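-- pv_equiv track=rewrite | github.com/UQTGK/Comp7811 | analyze.py | extract_json_objects
-- ===== SOURCE A (Python) =====
-- def extract_json_objects(text):
--     lines = text.splitlines()
--     objs = []
--     start_index = None
--
--     for i, line in enumerate(lines):
--         # 如果当前行只有一个开始大括号，那么这是一个新的JSON对象的开始
--         if line.strip() == '{':
--             start_index = i
--         # 如果当前行只有一个结束大括号，并且我们之前找到了一个开始大括号，那么这是一个JSON对象的结束
--         elif line.strip() == '}' and start_index is not None:
--             obj_str = '\n'.join(lines[start_index:i + 1])
--             objs.append(obj_str)
--             start_index = None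
--
--     return objs
-- ===== SOURCE B (Python) =====
-- def extract_json_objects(text):
--     objs = []
--     current = []
--     in_obj = False
--     for line in text.splitlines():
--         s = line.strip()
--         if s == '{':
--             # a new '{' starts a fresh object (discarding any partial one),
--             # mirroring the intent of the task
--             current = [line]
--             in_obj = True
--         elif s == '}' and in_obj:
--             current.append(line)
--             objs.append('\n'.join(current))
--             current = []
--             in_obj = False
--         elif in_obj:
--             current.append(line)
--     return objs
-- ===== Notes on version B (the rewrite author's own statement) =====
-- stated objective: alternative
-- what changed: B keeps a running buffer of the current object's lines instead of remembering a start index and re-slicing/re-joining the whole line list on each close brace.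
import Mathlib
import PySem

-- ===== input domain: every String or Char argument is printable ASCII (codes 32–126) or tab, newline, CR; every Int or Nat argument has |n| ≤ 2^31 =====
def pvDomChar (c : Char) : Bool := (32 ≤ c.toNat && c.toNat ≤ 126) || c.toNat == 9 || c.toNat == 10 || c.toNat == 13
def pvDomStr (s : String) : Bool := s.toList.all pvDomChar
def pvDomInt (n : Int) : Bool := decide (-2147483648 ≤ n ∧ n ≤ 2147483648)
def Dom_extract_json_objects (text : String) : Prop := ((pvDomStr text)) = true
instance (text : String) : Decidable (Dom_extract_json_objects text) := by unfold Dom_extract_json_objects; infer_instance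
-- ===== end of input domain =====

-- B replaces A's start-index + re-slice/re-join with a running buffer of the current object's lines (alternative decomposition; same single pass).

-- ===== PORT A =====
-- one loop step of A: state = (objs, start_index), input = (i, line)
def ajStep (lines : List String) (st : List String × Option Int) (p : Int × String) :
    List String × Option Int :=
  if PySem.Str.strip p.2 = "{" then (st.1, some p.1)
  else
    match st.2 with
    | some s =>
        if PySem.Str.strip p.2 = "}" then
          (st.1 ++ [PySem.Str.join "\n" (PySem.List.slice lines (some s) (some (p.1 + 1)))], none)
        else st
    | none => st

def extract_json_objects (text : String) : List String :=
  let lines := PySem.Str.splitlines text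
  ((PySem.List.enumerate lines 0).foldl (ajStep lines) ([], none)).1

-- ===== PORT B =====
-- one loop step of B: state = (objs, current, in_obj)
def bjStep (st : List String × List String × Bool) (line : String) :
    List String × List String × Bool :=
  let s := PySem.Str.strip line
  if s = "{" then (st.1, [line], true)
  else if s = "}" then
    if st.2.2 then (st.1 ++ [PySem.Str.join "\n" (st.2.1 ++ [line])], [], false) else st
  else if st.2.2 then (st.1, st.2.1 ++ [line], true) else st

def extract_json_objects_alt (text : String) : List String :=
  ((PySem.Str.splitlines text).foldl bjStep ([], [], false)).1

-- ===== PRECONDITION & SPEC =====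
def Spec_extract_json_objects (text : String) (out : List String) : Prop := out = extract_json_objects_alt text
instance (text : String) (out : List String) : Decidable (Spec_extract_json_objects text out) := by unfold Spec_extract_json_objects; infer_instance

-- ===== CLAIM (what is proved, stated in full; the proofs are below) =====
def Claim_equal_extract_json_objects : Prop := ∀ (text : String), Dom_extract_json_objects text → Spec_extract_json_objects text (extract_json_objects text)

-- ===== LEMMAS AND PROOFS =====

-- relation between A's state and B's state at position k of the full line list
def pvRel (lines : List String) (k : Nat) (os : Option Int) (cur : List String) (inb : Bool) : Prop :=
  (os = none ∧ inb = false ∧ cur = []) ∨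
  (∃ s : Nat, os = some (s : Int) ∧ inb = true ∧ s ≤ k ∧ cur = (lines.drop s).take (k - s))

lemma take_succ_of_drop {lines rest : List String} {line : String} {s k : Nat}
    (hs : s ≤ k) (hdrop : lines.drop k = line :: rest) :
    (lines.drop s).take (k - s + 1) = (lines.drop s).take (k - s) ++ [line] := by
  have h2 : (lines.drop s).drop (k - s) = line :: rest := by
    rw [List.drop_drop]
    have h : s + (k - s) = k := by omega
    rwa [h]
  rw [List.take_add, h2]
  simp

set_option maxRecDepth 4000 in
lemma pv_main (rest : List String) : ∀ (lines : List String) (k : Nat)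
    (objs cur : List String) (os : Option Int) (inb : Bool),
    lines.drop k = rest → pvRel lines k os cur inb →
    ((PySem.List.enumerate rest (k : Int)).foldl (ajStep lines) (objs, os)).1 =
      (rest.foldl bjStep (objs, cur, inb)).1 := by
  induction rest with
  | nil => intro lines k objs cur os inb _ _; simp [PySem.List.enumerate]
  | cons line rest ih =>
    intro lines k objs cur os inb hdrop hrel
    rw [PySem.List.enumerate_cons]
    simp only [List.foldl_cons]
    have hdrop' : lines.drop (k + 1) = rest := by
      rw [← List.drop_drop, hdrop, List.drop_one, List.tail_cons]
    by_cases hbr : PySem.Str.strip line = "{"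
    · -- new object starts: both reset the buffer / index
      rw [show ajStep lines (objs, os) ((k : Int), line) = (objs, some (k : Int)) by
            simp [ajStep, hbr],
          show bjStep (objs, cur, inb) line = (objs, [line], true) by simp [bjStep, hbr]]
      refine ih lines (k + 1) objs [line] _ _ hdrop' (Or.inr ⟨k, rfl, rfl, by omega, ?_⟩)
      rw [hdrop]; simp
    · by_cases hcl : PySem.Str.strip line = "}"
      · rcases hrel with ⟨ho, hi, hc⟩ | ⟨s, ho, hi, hsk, hc⟩
        · -- '}' with no open object: both states unchanged
          rw [show ajStep lines (objs, os) ((k : Int), line) = (objs, os) by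
                simp [ajStep, hbr, ho],
              show bjStep (objs, cur, inb) line = (objs, cur, inb) by
                simp [bjStep, hcl, hi]]
          exact ih lines (k + 1) objs cur os inb hdrop' (Or.inl ⟨ho, hi, hc⟩)
        · -- object closes: A joins the slice, B joins its buffer — same lines
          have hslice : PySem.List.slice lines (some (s : Int)) (some ((k : Int) + 1)) =
              cur ++ [line] := by
            have : ((k : Int) + 1) = ((k + 1 : Nat) : Int) := by push_cast; ring
            rw [this, PySem.List.slice_natCast, hc]
            have : k + 1 - s = k - s + 1 := by omega
            rw [this]
            exact take_succ_of_drop hsk hdrop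
          rw [show ajStep lines (objs, os) ((k : Int), line) =
                (objs ++ [PySem.Str.join "\n" (cur ++ [line])], none) by
                simp [ajStep, ho, hcl, hslice],
              show bjStep (objs, cur, inb) line =
                (objs ++ [PySem.Str.join "\n" (cur ++ [line])], [], false) by
                simp [bjStep, hcl, hi]]
          exact ih lines (k + 1) _ [] none false hdrop' (Or.inl ⟨rfl, rfl, rfl⟩)
      · -- ordinary line: A keeps its index, B appends to the open buffer
        rcases hrel with ⟨ho, hi, hc⟩ | ⟨s, ho, hi, hsk, hc⟩
        · rw [show ajStep lines (objs, os) ((k : Int), line) = (objs, os) by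
                simp [ajStep, hbr, ho],
              show bjStep (objs, cur, inb) line = (objs, cur, inb) by
                simp [bjStep, hbr, hcl, hi]]
          exact ih lines (k + 1) objs cur os inb hdrop' (Or.inl ⟨ho, hi, hc⟩)
        · rw [show ajStep lines (objs, os) ((k : Int), line) = (objs, os) by
                simp [ajStep, hbr, ho, hcl],
              show bjStep (objs, cur, inb) line = (objs, cur ++ [line], true) by
                simp [bjStep, hbr, hcl, hi]]
          refine ih lines (k + 1) objs (cur ++ [line]) os true hdrop'
            (Or.inr ⟨s, ho, rfl, by omega, ?_⟩)
          have : k + 1 - s = k - s + 1 := by omega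
          rw [this, take_succ_of_drop hsk hdrop, hc]

-- ===== VERDICT (by name: the statement is the Claim_ definition above) =====
theorem extract_json_objects_spec : Claim_equal_extract_json_objects := by
  intro text _
  show extract_json_objects text = extract_json_objects_alt text
  unfold extract_json_objects extract_json_objects_alt
  exact pv_main (PySem.Str.splitlines text) (PySem.Str.splitlines text) 0 [] [] none false
    (by simp) (Or.inl ⟨rfl, rfl, rfl⟩)
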